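-- pv_equiv track=rewrite | github.com/sungjin9288/DecisionDoc-AI | app/eval/bundle_eval.py | _check_non_empty_headings
-- ===== SOURCE A (Python) =====
-- def _check_non_empty_headings(markdown: str, headings: list[str]) -> tuple[list[str], list[str]]:
--     """Return (non_empty, empty) for critical headings."""
--     non_empty, empty = [], []
--     lines = markdown.splitlines()
--     for h in headings:
--         found_heading = False
--         has_content = False
--         for i, line in enumerate(lines):
--             if line.strip() == h.strip():
--                 found_heading = True
--                 # Check next non-empty lines for content
--                 for j in range(i + 1, min(i + 10, len(lines))):
--                     nxt = lines[j].strip()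
--                     if nxt.startswith("#"):
--                         break
--                     if nxt:
--                         has_content = True
--                         break
--                 break
--         if found_heading and has_content:
--             non_empty.append(h)
--         elif found_heading:
--             empty.append(h)
--         else:
--             empty.append(h)  # Missing heading is also "empty"
--     return non_empty, empty
-- ===== SOURCE B (Python) =====
-- def _check_non_empty_headings(markdown: str, headings: list[str]) -> tuple[list[str], list[str]]:
--     """Return (non_empty, empty) for critical headings.
--
--     A backward pass computes, for every line, whether real content
--     follows it within the next 9 lines (tracking the distance to the
--     nearest non-blank line below instead of re-scanning a window), then a
--     first-occurrence status table and two comprehensions over the headings.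
--     """
--     lines = markdown.splitlines()
--     flags = []
--     nearest = None  # (distance to first non-blank line below, it is content?)
--     for line in reversed(lines):
--         flags.append(nearest is not None and nearest[0] <= 8 and nearest[1])
--         s = line.strip()
--         if s:
--             nearest = (0, not s.startswith("#"))
--         elif nearest is not None:
--             nearest = (nearest[0] + 1, nearest[1])
--     flags.reverse()
--     status = {}
--     for line, f in zip(lines, flags):
--         key = line.strip()
--         if key not in status:
--             status[key] = f
--     non_empty = [h for h in headings if status.get(h.strip(), False)]
--     empty = [h for h in headings if not status.get(h.strip(), False)]
--     return non_empty, empty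
-- ===== Notes on version B (the rewrite author's own statement) =====
-- stated objective: alternative
-- what changed: B replaces A's per-heading rescans and per-line 9-line window scans with one backward pass that tracks the distance to the nearest non-blank line below (computing every line's has-content flag in O(1)), a first-occurrence status dict, and two comprehensions over the headings.
import Mathlib
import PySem

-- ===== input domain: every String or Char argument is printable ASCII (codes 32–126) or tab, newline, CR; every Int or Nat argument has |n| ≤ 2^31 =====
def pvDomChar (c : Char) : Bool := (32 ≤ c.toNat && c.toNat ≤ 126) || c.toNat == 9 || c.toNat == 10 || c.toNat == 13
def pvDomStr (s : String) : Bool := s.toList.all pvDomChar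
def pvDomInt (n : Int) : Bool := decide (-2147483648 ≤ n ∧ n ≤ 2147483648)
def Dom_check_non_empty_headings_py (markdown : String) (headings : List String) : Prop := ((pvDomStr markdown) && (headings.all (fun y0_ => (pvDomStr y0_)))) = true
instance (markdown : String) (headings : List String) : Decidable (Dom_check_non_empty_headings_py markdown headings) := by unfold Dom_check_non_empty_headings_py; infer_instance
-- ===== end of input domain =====

-- B computes every line's has-content flag in one backward pass (distance to the nearest
-- non-blank line below) plus a first-occurrence status dict, instead of A's per-heading
-- rescans with a 9-line window scan at each match; objective: alternative algorithm.

-- ===== PORT A =====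
-- inner loop: for j in range(i+1, min(i+10, len(lines))): …
def paWindow (lines : List String) : List Int → Bool
  | [] => false
  | j :: rest =>
    let nxt := PySem.Str.strip (PySem.List.pyGetD lines j "")
    if PySem.Str.startswith nxt "#" then false
    else if nxt ≠ "" then true
    else paWindow lines rest

-- outer scan: for i, line in enumerate(lines): … break on first match
def paScan (lines : List String) (hs : String) : List (Int × String) → Bool × Bool
  | [] => (false, false)
  | (i, line) :: rest =>
    if PySem.Str.strip line == hs then
      (true, paWindow lines (PySem.List.pyRange (i + 1) (min (i + 10) (lines.length : Int)) 1))
    else paScan lines hs rest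

def check_non_empty_headings_py (markdown : String) (headings : List String) : List String × List String :=
  let lines := PySem.Str.splitlines markdown
  headings.foldl (fun acc h =>
    let r := paScan lines (PySem.Str.strip h) (PySem.List.enumerate lines 0)
    if r.1 && r.2 then (acc.1 ++ [h], acc.2)
    else if r.1 then (acc.1, acc.2 ++ [h])
    else (acc.1, acc.2 ++ [h])) ([], [])

-- ===== PORT B =====
-- backward pass (python: for line in reversed(lines), flags collected then reversed —
-- here the structural recursion yields the forward-ordered flag list directly):
-- state = (distance to the nearest non-blank line below, whether it is content)
def pbFlags : List String → List Bool × Option (Nat × Bool)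
  | [] => ([], none)
  | line :: rest =>
    let p := pbFlags rest
    let flag := match p.2 with
      | some (d, c) => decide (d ≤ 8) && c
      | none => false
    let s := PySem.Str.strip line
    let st := if s ≠ "" then some (0, !PySem.Str.startswith s "#")
      else match p.2 with
        | some (d, c) => some (d + 1, c)
        | none => none
    (flag :: p.1, st)

-- status[key] is set only at the first occurrence of key
def pbBuild : List (String × Bool) → PySem.Dict String Bool → PySem.Dict String Bool
  | [], d => d
  | (line, f) :: rest, d =>
    let key := PySem.Str.strip line
    pbBuild rest (if (d.get? key).isNone then d.insert key f else d)

def check_non_empty_headings_py_alt (markdown : String) (headings : List String) : List String × List String :=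
  let lines := PySem.Str.splitlines markdown
  let status := pbBuild (lines.zip (pbFlags lines).1) PySem.Dict.empty
  (headings.filter (fun h => status.getD (PySem.Str.strip h) false),
   headings.filter (fun h => !(status.getD (PySem.Str.strip h) false)))

-- ===== PRECONDITION & SPEC =====
def Spec_check_non_empty_headings_py (markdown : String) (headings : List String) (out : List String × List String) : Prop := out = check_non_empty_headings_py_alt markdown headings
instance (markdown : String) (headings : List String) (out : List String × List String) : Decidable (Spec_check_non_empty_headings_py markdown headings out) := by unfold Spec_check_non_empty_headings_py; infer_instance

-- ===== CLAIM (what is proved, stated in full; the proofs are below) =====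
def Claim_equal_check_non_empty_headings_py : Prop := ∀ (markdown : String) (headings : List String), Dom_check_non_empty_headings_py markdown headings → Spec_check_non_empty_headings_py markdown headings (check_non_empty_headings_py markdown headings)

-- ===== LEMMAS AND PROOFS =====

-- spec of A's 9-line window: scan at most k lines of a suffix for the first non-blank
def wWin : Nat → List String → Bool
  | 0, _ => false
  | _ + 1, [] => false
  | k + 1, line :: r =>
    let s := PySem.Str.strip line
    if PySem.Str.startswith s "#" then false
    else if s ≠ "" then true
    else wWin k r

-- each line paired with the flag of its suffix
def zf : List String → List (String × Bool)
  | [] => []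
  | line :: r => (line, wWin 9 r) :: zf r

-- first pair whose stripped line equals the key
def scanZ (key : String) : List (String × Bool) → Bool × Bool
  | [] => (false, false)
  | (line, f) :: r => if PySem.Str.strip line == key then (true, f) else scanZ key r

theorem wWin_nil (k : Nat) : wWin k [] = false := by cases k <;> rfl

theorem pbFlags_state (rest : List String) (k : Nat) :
    (match (pbFlags rest).2 with
      | some (d, c) => decide (d < k) && c
      | none => false) = wWin k rest := by
  induction rest generalizing k with
  | nil => simp [pbFlags, wWin_nil]
  | cons line r ih =>
    cases k with
    | zero =>
      rcases hst : (pbFlags (line :: r)).2 with _ | ⟨d, c⟩ <;> simp [wWin]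
    | succ k =>
      simp only [pbFlags, wWin]
      by_cases hs : PySem.Str.strip line ≠ ""
      · by_cases hh : PySem.Str.startswith (PySem.Str.strip line) "#"
        · simp [hs]
        · simp [hs]
      · have hs' : PySem.Str.strip line = "" := by simpa using hs
        simp only [hs']
        rw [← ih k]
        cases hst : (pbFlags r).2 with
        | none => simp
        | some p =>
          obtain ⟨d, c⟩ := p
          show (decide (d + 1 < k + 1) && c) = (decide (d < k) && c)
          congr 1
          simp only [decide_eq_decide]
          omega

theorem zip_flags_eq (lines : List String) : lines.zip (pbFlags lines).1 = zf lines := by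
  induction lines with
  | nil => rfl
  | cons line r ih =>
    simp only [pbFlags, zf, List.zip_cons_cons]
    refine congrArg₂ _ ?_ ih
    have := pbFlags_state r 9
    have h89 : ∀ d : Nat, (decide (d ≤ 8)) = (decide (d < 9)) := by
      intro d; simp only [decide_eq_decide]; omega
    cases hst : (pbFlags r).2 with
    | none => rw [hst] at this; simp_all
    | some p =>
      obtain ⟨d, c⟩ := p
      rw [hst] at this
      simp only at this ⊢
      rw [h89 d]; rw [this]

theorem paWindow_eq_wWin (lines : List String) (k a : Nat) (ha : a ≤ lines.length) :
    paWindow lines (PySem.List.pyRange (a : Int) (min ((a : Int) + k) (lines.length : Int)) 1)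
      = wWin k (lines.drop a) := by
  induction k generalizing a with
  | zero =>
    rw [PySem.List.pyRange_one_eq_nil (show min ((a : Int) + ((0 : Nat) : Int)) (lines.length : Int) ≤ (a : Int) by push_cast; omega)]
    simp [paWindow, wWin]
  | succ k ih =>
    by_cases hlen : a < lines.length
    · have hb : (a : Int) < min ((a : Int) + (k + 1 : Nat)) (lines.length : Int) := by
        push_cast; omega
      rw [PySem.List.pyRange_one_cons hb]
      have hdrop : lines.drop a = lines[a] :: lines.drop (a + 1) :=
        List.drop_eq_getElem_cons hlen
      rw [hdrop]
      have hget : PySem.List.pyGetD lines (a : Int) "" = lines[a] := by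
        rw [PySem.List.pyGetD_natCast]
        exact List.getD_eq_getElem _ _ hlen
      have hrec : paWindow lines
          (PySem.List.pyRange ((a : Int) + 1) (min ((a : Int) + (k + 1 : Nat)) (lines.length : Int)) 1)
            = wWin k (lines.drop (a + 1)) := by
        have h1 : ((a : Int) + 1) = ((a + 1 : Nat) : Int) := by push_cast; ring
        have h2 : min ((a : Int) + (k + 1 : Nat)) (lines.length : Int)
            = min (((a + 1 : Nat) : Int) + (k : Int)) (lines.length : Int) := by push_cast; omega
        rw [h1, h2]
        exact ih (a + 1) (by omega)
      simp only [paWindow, wWin, hget, hrec]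
    · have ha' : a = lines.length := by omega
      rw [PySem.List.pyRange_one_eq_nil (show min ((a : Int) + (k + 1 : Nat)) (lines.length : Int) ≤ (a : Int) by subst ha'; push_cast; omega)]
      subst ha'
      simp [paWindow, wWin_nil]

theorem paScan_eq_scanZ (key : String) (lines : List String) :
    ∀ (s : List String) (n : Nat), s = lines.drop n →
      paScan lines key (PySem.List.enumerate s (n : Int)) = scanZ key (zf s) := by
  intro s
  induction s with
  | nil => intro n _; rfl
  | cons line r ih =>
    intro n hdrop
    have hn : n < lines.length := by
      by_contra hge
      have hnil : lines.drop n = [] := List.drop_eq_nil_of_le (by omega)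
      rw [hnil] at hdrop; exact List.cons_ne_nil _ _ hdrop
    have hcons := List.drop_eq_getElem_cons hn (l := lines)
    rw [← hdrop] at hcons
    obtain ⟨hline, hr⟩ := List.cons.injEq _ _ _ _ ▸ hcons
    rw [PySem.List.enumerate_cons]
    simp only [paScan, zf, scanZ]
    by_cases hk : PySem.Str.strip line == key
    · simp only [hk, if_pos]
      refine congrArg _ ?_
      have harg : ((n : Int) + 1) = ((n + 1 : Nat) : Int) := by push_cast; ring
      have harg2 : min ((n : Int) + 10) (lines.length : Int)
          = min (((n + 1 : Nat) : Int) + (9 : Nat)) (lines.length : Int) := by push_cast; omega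
      rw [harg, harg2, paWindow_eq_wWin lines 9 (n + 1) (by omega), ← hr]
    · simp only [hk, Bool.false_eq_true, if_false]
      have harg : ((n : Int) + 1) = ((n + 1 : Nat) : Int) := by push_cast; ring
      rw [harg]
      exact ih (n + 1) hr

theorem build_preserve (ps : List (String × Bool)) :
    ∀ (d : PySem.Dict String Bool) (k : String) (v : Bool),
      d.get? k = some v → (pbBuild ps d).get? k = some v := by
  induction ps with
  | nil => intro d k v h; simpa [pbBuild] using h
  | cons p rest ih =>
    intro d k v h
    obtain ⟨line, f⟩ := p
    simp only [pbBuild]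
    split
    · apply ih
      by_cases hk : k = PySem.Str.strip line
      · subst hk; simp_all
      · rw [PySem.Dict.get?_insert_of_ne _ _ hk]; exact h
    · exact ih d k v h

theorem build_lookup (ps : List (String × Bool)) :
    ∀ (d : PySem.Dict String Bool) (key : String), d.get? key = none →
      (pbBuild ps d).getD key false = ((scanZ key ps).1 && (scanZ key ps).2) := by
  induction ps with
  | nil =>
    intro d key h
    simp [pbBuild, scanZ, PySem.Dict.getD, h]
  | cons p rest ih =>
    intro d key h
    obtain ⟨line, f⟩ := p
    by_cases heq : PySem.Str.strip line = key
    · subst heq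
      have hnone : (d.get? (PySem.Str.strip line)).isNone = true := by rw [h]; rfl
      have hins :
          (pbBuild rest (d.insert (PySem.Str.strip line) f)).get? (PySem.Str.strip line)
            = some f :=
        build_preserve rest _ _ _ (PySem.Dict.get?_insert_self _ _ _)
      simp only [pbBuild, hnone, scanZ, beq_self_eq_true, if_pos]
      simp [PySem.Dict.getD, hins]
    · have hbeq : (PySem.Str.strip line == key) = false := by simp [heq]
      simp only [pbBuild, scanZ, hbeq, Bool.false_eq_true, if_false]
      split
      · exact ih _ key (by rw [PySem.Dict.get?_insert_of_ne _ _ (fun hc => heq hc.symm)]; exact h)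
      · exact ih d key h

theorem foldl_two_filters (p : String → Bool) (hs : List String) :
    ∀ (a b : List String),
      hs.foldl (fun acc h => if p h then (acc.1 ++ [h], acc.2) else (acc.1, acc.2 ++ [h])) (a, b)
        = (a ++ hs.filter p, b ++ hs.filter (fun h => !p h)) := by
  induction hs with
  | nil => intro a b; simp
  | cons h t ih =>
    intro a b
    by_cases hp : p h
    · simp [List.foldl_cons, hp, ih]
    · simp [List.foldl_cons, hp, ih]

-- ===== VERDICT (by name: the statement is the Claim_ definition above) =====
theorem check_non_empty_headings_py_spec : Claim_equal_check_non_empty_headings_py := by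
  intro markdown headings _
  unfold Spec_check_non_empty_headings_py
  unfold check_non_empty_headings_py check_non_empty_headings_py_alt
  simp only []
  set lines := PySem.Str.splitlines markdown with hlines
  have hstatus : ∀ h : String,
      (pbBuild (lines.zip (pbFlags lines).1) PySem.Dict.empty).getD (PySem.Str.strip h) false
        = ((paScan lines (PySem.Str.strip h) (PySem.List.enumerate lines 0)).1
            && (paScan lines (PySem.Str.strip h) (PySem.List.enumerate lines 0)).2) := by
    intro h
    rw [zip_flags_eq, build_lookup _ _ _ (PySem.Dict.get?_empty _)]
    have h0 : (0 : Int) = ((0 : Nat) : Int) := rfl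
    rw [h0, paScan_eq_scanZ (PySem.Str.strip h) lines lines 0 (by simp)]
  have hA : headings.foldl (fun acc h =>
      let r := paScan lines (PySem.Str.strip h) (PySem.List.enumerate lines 0)
      if r.1 && r.2 then (acc.1 ++ [h], acc.2)
      else if r.1 then (acc.1, acc.2 ++ [h])
      else (acc.1, acc.2 ++ [h])) ([], []) =
    headings.foldl (fun acc h =>
      if ((paScan lines (PySem.Str.strip h) (PySem.List.enumerate lines 0)).1
          && (paScan lines (PySem.Str.strip h) (PySem.List.enumerate lines 0)).2)
      then (acc.1 ++ [h], acc.2) else (acc.1, acc.2 ++ [h])) ([], []) := by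
    apply PySem.List.foldl_congr_mem
    intro acc h _
    by_cases hc : ((paScan lines (PySem.Str.strip h) (PySem.List.enumerate lines 0)).1
        && (paScan lines (PySem.Str.strip h) (PySem.List.enumerate lines 0)).2) = true
    · simp [hc]
    · simp only [Bool.not_eq_true] at hc
      simp only [hc, Bool.false_eq_true, if_false]
      split <;> rfl
  rw [hA]
  have := foldl_two_filters (fun h =>
      ((paScan lines (PySem.Str.strip h) (PySem.List.enumerate lines 0)).1
        && (paScan lines (PySem.Str.strip h) (PySem.List.enumerate lines 0)).2)) headings [] []
  rw [this]
  simp only [List.nil_append]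
  refine congrArg₂ _ ?_ ?_ <;> [skip; skip] <;>
    { apply List.filter_congr; intro h _; rw [hstatus h] }
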